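-- pv_equiv track=rewrite | github.com/tincanlab/ea-repo | scripts/discover_enterprise_repo_graph.py | _missing_launch_requirements
-- ===== SOURCE A (Python) =====
-- def _missing_launch_requirements(role: str, launch_env: dict[str, str]) -> list[str]:
--     missing: list[str] = []
--     if role == "sa":
--         for key in ("INITIATIVE_ID", "OPENARCHITECT_EA_REPO_URL"):
--             if not str(launch_env.get(key) or "").strip():
--                 missing.append(key)
--     elif role == "da":
--         for key in ("WORKSTREAM_ID", "OPENARCHITECT_SA_REPO_URL"):
--             if not str(launch_env.get(key) or "").strip():
--                 missing.append(key)
--     elif role == "dev":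
--         if (
--             not str(launch_env.get("WORK_ITEM_ID") or "").strip()
--             and not str(launch_env.get("API_ID") or "").strip()
--         ):
--             missing.append("WORK_ITEM_ID or API_ID")
--     return missing
-- ===== SOURCE B (Python) =====
-- # Flat requirement-row table: one scan of launch_env builds the set of keys with a
-- # non-blank value, then each row (role, label, trigger-keys) emits its label when the
-- # role matches and none of its trigger keys was provided.
-- _REQUIREMENTS = [
--     ("sa", "INITIATIVE_ID", ("INITIATIVE_ID",)),
--     ("sa", "OPENARCHITECT_EA_REPO_URL", ("OPENARCHITECT_EA_REPO_URL",)),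
--     ("da", "WORKSTREAM_ID", ("WORKSTREAM_ID",)),
--     ("da", "OPENARCHITECT_SA_REPO_URL", ("OPENARCHITECT_SA_REPO_URL",)),
--     ("dev", "WORK_ITEM_ID or API_ID", ("WORK_ITEM_ID", "API_ID")),
-- ]
--
--
-- def _missing_launch_requirements(role: str, launch_env: dict[str, str]) -> list[str]:
--     provided = {k for k, v in launch_env.items() if str(v or "").strip()}
--     return [
--         label
--         for r, label, keys in _REQUIREMENTS
--         if r == role and provided.isdisjoint(keys)
--     ]
-- ===== Notes on version B (the rewrite author's own statement) =====
-- stated objective: alternative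
-- what changed: Instead of branching on the role and probing the dict per key, B scans launch_env once to build the set of keys with a non-blank value, then filters one flat table of requirement rows (role, label, trigger-keys), emitting each label whose row matches the role and whose trigger keys are all absent from that set; the Lean Pre_ only excludes association lists with duplicate keys, which cannot arise from a Python dict.
import Mathlib
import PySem

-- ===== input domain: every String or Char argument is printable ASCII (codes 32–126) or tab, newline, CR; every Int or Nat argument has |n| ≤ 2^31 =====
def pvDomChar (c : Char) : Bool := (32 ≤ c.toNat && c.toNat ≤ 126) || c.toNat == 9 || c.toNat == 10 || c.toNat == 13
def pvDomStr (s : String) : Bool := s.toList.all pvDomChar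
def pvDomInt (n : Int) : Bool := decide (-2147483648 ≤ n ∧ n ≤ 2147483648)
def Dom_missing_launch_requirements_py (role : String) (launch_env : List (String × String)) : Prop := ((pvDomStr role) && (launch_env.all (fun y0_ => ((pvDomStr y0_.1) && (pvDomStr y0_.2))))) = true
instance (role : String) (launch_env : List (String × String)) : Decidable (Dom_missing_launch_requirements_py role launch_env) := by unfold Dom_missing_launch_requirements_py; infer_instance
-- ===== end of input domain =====

-- B scans launch_env once into the set of non-blank keys, then filters a flat
-- requirement-row table (role, label, trigger-keys) against that set (objective: alternative).


-- ===== PORT A =====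
-- `str(launch_env.get(key) or "").strip()` is empty  ⇔  strip((get? key).getD "") == ""
-- (get(key) = None or "" both collapse to "" through `or ""`; str() is identity on str).
def missing_launch_requirements_py (role : String) (launch_env : List (String × String)) : List String :=
  let missing : List String := []
  if role == "sa" then
    ["INITIATIVE_ID", "OPENARCHITECT_EA_REPO_URL"].foldl
      (fun missing key =>
        if PySem.Str.strip (((PySem.Dict.mk launch_env).get? key).getD "") == "" then
          missing ++ [key]
        else missing) missing
  else if role == "da" then
    ["WORKSTREAM_ID", "OPENARCHITECT_SA_REPO_URL"].foldl
      (fun missing key =>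
        if PySem.Str.strip (((PySem.Dict.mk launch_env).get? key).getD "") == "" then
          missing ++ [key]
        else missing) missing
  else if role == "dev" then
    if PySem.Str.strip (((PySem.Dict.mk launch_env).get? "WORK_ITEM_ID").getD "") == "" &&
       PySem.Str.strip (((PySem.Dict.mk launch_env).get? "API_ID").getD "") == "" then
      missing ++ ["WORK_ITEM_ID or API_ID"]
    else missing
  else missing

-- ===== PORT B =====
-- flat table of requirement rows: (role, emitted label, trigger keys that must all be blank)
def pvRequirements : List (String × String × List String) :=
  [("sa", "INITIATIVE_ID", ["INITIATIVE_ID"]),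
   ("sa", "OPENARCHITECT_EA_REPO_URL", ["OPENARCHITECT_EA_REPO_URL"]),
   ("da", "WORKSTREAM_ID", ["WORKSTREAM_ID"]),
   ("da", "OPENARCHITECT_SA_REPO_URL", ["OPENARCHITECT_SA_REPO_URL"]),
   ("dev", "WORK_ITEM_ID or API_ID", ["WORK_ITEM_ID", "API_ID"])]

-- `{k for k, v in launch_env.items() if str(v or "").strip()}`
def pvProvided (launch_env : List (String × String)) : PySem.Set String :=
  PySem.Set.ofList ((launch_env.filter (fun p => !(PySem.Str.strip p.2 == ""))).map Prod.fst)

def missing_launch_requirements_py_alt (role : String) (launch_env : List (String × String)) : List String :=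
  let provided := pvProvided launch_env
  (pvRequirements.filter
      (fun row => row.1 == role && row.2.2.all (fun k => !(provided.contains k)))).map
    (fun row => row.2.1)

-- ===== PRECONDITION & SPEC =====
-- Pre_ excludes association lists with duplicate keys: a Python dict cannot contain them,
-- and on such lists A's first-binding lookup vs B's whole-list scan is accidental.
def Pre_missing_launch_requirements_py (role : String) (launch_env : List (String × String)) : Prop :=
  (launch_env.map Prod.fst).Nodup
instance (role : String) (launch_env : List (String × String)) : Decidable (Pre_missing_launch_requirements_py role launch_env) := by unfold Pre_missing_launch_requirements_py; infer_instance
def pvWitness_missing_launch_requirements_py : String × (List (String × String)) :=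
  ("sa", [("INITIATIVE_ID", " "), ("OPENARCHITECT_EA_REPO_URL", "x")])
def Spec_missing_launch_requirements_py (role : String) (launch_env : List (String × String)) (out : List String) : Prop := out = missing_launch_requirements_py_alt role launch_env
instance (role : String) (launch_env : List (String × String)) (out : List String) : Decidable (Spec_missing_launch_requirements_py role launch_env out) := by unfold Spec_missing_launch_requirements_py; infer_instance

-- ===== CLAIM (what is proved, stated in full; the proofs are below) =====
def Claim_equal_missing_launch_requirements_py : Prop := ∀ (role : String) (launch_env : List (String × String)), Dom_missing_launch_requirements_py role launch_env → Pre_missing_launch_requirements_py role launch_env → Spec_missing_launch_requirements_py role launch_env (missing_launch_requirements_py role launch_env)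

-- ===== LEMMAS AND PROOFS =====
-- key ∈ B's provided set  ⇔  A's blank test on that key fails (requires Nodup keys).
theorem pv_provided_iff (launch_env : List (String × String))
    (h : (launch_env.map Prod.fst).Nodup) (k : String) :
    k ∈ pvProvided launch_env
      ↔ ¬ PySem.Str.strip (((PySem.Dict.mk launch_env).get? k).getD "") = "" := by
  simp only [pvProvided, PySem.Set.mem_ofList]
  induction launch_env with
  | nil => simp [PySem.Dict.get?]; decide
  | cons p rest ih =>
    have hrest : (rest.map Prod.fst).Nodup := (List.nodup_cons.mp h).2
    have hnotin : p.1 ∉ rest.map Prod.fst := (List.nodup_cons.mp h).1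
    rw [PySem.Dict.get?_mk_cons]
    by_cases hk : p.1 = k
    · subst hk
      simp only [beq_self_eq_true, if_pos rfl, Option.getD_some]
      by_cases hs : PySem.Str.strip p.2 = ""
      · have hno : p.1 ∉ (rest.filter (fun q => !(PySem.Str.strip q.2 == ""))).map Prod.fst := by
          intro hc
          rcases List.mem_map.mp hc with ⟨q, hq, hq1⟩
          exact hnotin (List.mem_map.mpr ⟨q, List.mem_of_mem_filter hq, hq1⟩)
        simp [List.filter_cons, hs, hno]
      · simp [List.filter_cons, hs]
    · have hbeq : (p.1 == k) = false := by simp [hk]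
      rw [hbeq]
      simp only [Bool.false_eq_true, if_false]
      rw [← ih hrest]
      by_cases hs : PySem.Str.strip p.2 = ""
      · simp [List.filter_cons, hs]
      · simp [List.filter_cons, hs, Ne.symm hk]

-- ===== VERDICT (by name: the statement is the Claim_ definition above) =====
theorem missing_launch_requirements_py_spec : Claim_equal_missing_launch_requirements_py := by
  intro role launch_env _ hpre
  unfold Spec_missing_launch_requirements_py
  unfold missing_launch_requirements_py missing_launch_requirements_py_alt pvRequirements
  have hb := fun k => pv_provided_iff launch_env hpre k
  by_cases hsa : role = "sa"
  · subst hsa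
    simp only [List.foldl, List.filter, List.map]
    by_cases h1 : PySem.Str.strip (((PySem.Dict.mk launch_env).get? "INITIATIVE_ID").getD "") = "" <;>
      by_cases h2 : PySem.Str.strip (((PySem.Dict.mk launch_env).get? "OPENARCHITECT_EA_REPO_URL").getD "") = ""
    · have m1 : "INITIATIVE_ID" ∉ pvProvided launch_env := fun hm => (hb _).mp hm h1
      have m2 : "OPENARCHITECT_EA_REPO_URL" ∉ pvProvided launch_env := fun hm => (hb _).mp hm h2
      simp [h1, h2, m1, m2]
    · have m1 : "INITIATIVE_ID" ∉ pvProvided launch_env := fun hm => (hb _).mp hm h1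
      have m2 : "OPENARCHITECT_EA_REPO_URL" ∈ pvProvided launch_env := (hb _).mpr h2
      simp [h1, h2, m1, m2]
    · have m1 : "INITIATIVE_ID" ∈ pvProvided launch_env := (hb _).mpr h1
      have m2 : "OPENARCHITECT_EA_REPO_URL" ∉ pvProvided launch_env := fun hm => (hb _).mp hm h2
      simp [h1, h2, m1, m2]
    · have m1 : "INITIATIVE_ID" ∈ pvProvided launch_env := (hb _).mpr h1
      have m2 : "OPENARCHITECT_EA_REPO_URL" ∈ pvProvided launch_env := (hb _).mpr h2
      simp [h1, h2, m1, m2]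
  · by_cases hda : role = "da"
    · subst hda
      simp only [List.foldl, List.filter, List.map]
      by_cases h1 : PySem.Str.strip (((PySem.Dict.mk launch_env).get? "WORKSTREAM_ID").getD "") = "" <;>
        by_cases h2 : PySem.Str.strip (((PySem.Dict.mk launch_env).get? "OPENARCHITECT_SA_REPO_URL").getD "") = ""
      · have m1 : "WORKSTREAM_ID" ∉ pvProvided launch_env := fun hm => (hb _).mp hm h1
        have m2 : "OPENARCHITECT_SA_REPO_URL" ∉ pvProvided launch_env := fun hm => (hb _).mp hm h2
        simp [h1, h2, m1, m2]
      · have m1 : "WORKSTREAM_ID" ∉ pvProvided launch_env := fun hm => (hb _).mp hm h1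
        have m2 : "OPENARCHITECT_SA_REPO_URL" ∈ pvProvided launch_env := (hb _).mpr h2
        simp [h1, h2, m1, m2]
      · have m1 : "WORKSTREAM_ID" ∈ pvProvided launch_env := (hb _).mpr h1
        have m2 : "OPENARCHITECT_SA_REPO_URL" ∉ pvProvided launch_env := fun hm => (hb _).mp hm h2
        simp [h1, h2, m1, m2]
      · have m1 : "WORKSTREAM_ID" ∈ pvProvided launch_env := (hb _).mpr h1
        have m2 : "OPENARCHITECT_SA_REPO_URL" ∈ pvProvided launch_env := (hb _).mpr h2
        simp [h1, h2, m1, m2]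
    · by_cases hdev : role = "dev"
      · subst hdev
        have e1 : ("dev" == "sa") = false := by decide
        have e2 : ("dev" == "da") = false := by decide
        simp only [e1, e2, Bool.false_eq_true, if_false, beq_self_eq_true, if_pos,
          List.filter, List.map, List.all]
        by_cases h1 : PySem.Str.strip (((PySem.Dict.mk launch_env).get? "WORK_ITEM_ID").getD "") = "" <;>
          by_cases h2 : PySem.Str.strip (((PySem.Dict.mk launch_env).get? "API_ID").getD "") = ""
        · have m1 : "WORK_ITEM_ID" ∉ pvProvided launch_env := fun hm => (hb _).mp hm h1
          have m2 : "API_ID" ∉ pvProvided launch_env := fun hm => (hb _).mp hm h2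
          simp [h1, h2, m1, m2]
        · have m2 : "API_ID" ∈ pvProvided launch_env := (hb _).mpr h2
          simp [h1, h2, m2]
        · have m1 : "WORK_ITEM_ID" ∈ pvProvided launch_env := (hb _).mpr h1
          simp [h1, h2, m1]
        · have m1 : "WORK_ITEM_ID" ∈ pvProvided launch_env := (hb _).mpr h1
          simp [h1, h2, m1]
      · have h1 : ("sa" == role) = false := by simp [Ne.symm hsa]
        have h2 : ("da" == role) = false := by simp [Ne.symm hda]
        have h3 : ("dev" == role) = false := by simp [Ne.symm hdev]
        simp [hsa, hda, hdev, h1, h2, h3]
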